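-- pv_equiv track=rewrite | github.com/BJdeBordeaux/SU | Bio-info/week3/td3.py | compare_intervalles
-- ===== SOURCE A (Python) =====
-- def compare_intervalles(intervalle_1, intervalle_2):
--     """Renvoi la matrice de confusion.
--     entrée1 intervalle_1: Liste binaire representant un genome de reference
--     entrée2 intervalle_2: Liste binaire representant un les predictions de genes
--     sortie1 matrix: matrice de confusion
--     >>> compare_intervalles([0, 0, 1, 1, 1, 1, 1, 1, 0, 0, 1, 1, 1, 0, 0, 1, 1, 1, 1, 1, 1, 0],[0, 0, 0, 1, 1, 1, 1, 0, 0, 0, 1, 1, 1, 0, 0, 0, 0, 1, 1, 1, 1, 0])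
--     [[7, 0], [4, 11]]
--     """
--     assert(len(intervalle_1) == len(intervalle_2))
--     vn = fp = fn = vp = 0
--     for i in range(len(intervalle_1)):
--         annote = intervalle_1[i]
--         predit = intervalle_2[i]
--         vrai = annote == predit
--         positif = predit == 1
--         if vrai and positif:
--             vp += 1
--         elif vrai:
--             vn += 1
--         elif not vrai and positif:
--             fp += 1
--         else:
--             fn += 1
--     matrix = [[vn, fp], [fn, vp]]
--     return matrix
-- ===== SOURCE B (Python) =====
-- def compare_intervalles(intervalle_1, intervalle_2):
--     """Confusion matrix by inclusion-exclusion over three aggregate tallies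
--     (no per-element four-way classification)."""
--     assert len(intervalle_1) == len(intervalle_2)
--     n = len(intervalle_1)
--     eq = sum(a == b for a, b in zip(intervalle_1, intervalle_2))
--     pos = sum(b == 1 for b in intervalle_2)
--     vp = sum(a == b and b == 1 for a, b in zip(intervalle_1, intervalle_2))
--     return [[eq - vp, pos - vp], [n - eq - pos + vp, vp]]
-- ===== Notes on version B (the rewrite author's own statement) =====
-- stated objective: alternative
-- what changed: Replaces the per-element four-way if/elif classification with four accumulators by three aggregate tallies (equal pairs, predictions equal to 1, equal-and-1 pairs) combined by inclusion-exclusion arithmetic into the four matrix cells.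
import Mathlib
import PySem

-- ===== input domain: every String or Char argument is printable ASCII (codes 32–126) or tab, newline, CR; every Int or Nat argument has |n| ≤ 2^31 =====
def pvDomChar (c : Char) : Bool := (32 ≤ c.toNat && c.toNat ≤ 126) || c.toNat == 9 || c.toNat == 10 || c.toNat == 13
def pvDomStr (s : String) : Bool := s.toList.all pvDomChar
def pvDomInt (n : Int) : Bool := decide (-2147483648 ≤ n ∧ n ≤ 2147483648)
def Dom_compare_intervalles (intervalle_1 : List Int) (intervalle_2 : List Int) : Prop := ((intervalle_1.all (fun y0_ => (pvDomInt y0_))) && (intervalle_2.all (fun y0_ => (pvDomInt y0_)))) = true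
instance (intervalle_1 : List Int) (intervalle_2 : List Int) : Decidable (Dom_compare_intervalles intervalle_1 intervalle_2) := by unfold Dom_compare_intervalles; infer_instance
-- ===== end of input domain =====

-- B derives the confusion matrix by inclusion-exclusion from three aggregate tallies
-- (eq, pos, vp) instead of A's per-element four-way branch (objective: alternative).


-- ===== PORT A =====
-- loop body of A: state (vn, fp, fn, vp), index i into both lists (pyGet? never
-- returns none on the indices pyRange produces here; the none arm is unreachable)
def pvBodyA (i1 i2 : List Int) (st : Int × Int × Int × Int) (i : Int) : Int × Int × Int × Int :=
  match PySem.List.pyGet? i1 i, PySem.List.pyGet? i2 i with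
  | some annote, some predit =>
    let vrai := annote == predit
    let positif := predit == 1
    if vrai && positif then (st.1, st.2.1, st.2.2.1, st.2.2.2 + 1)
    else if vrai then (st.1 + 1, st.2.1, st.2.2.1, st.2.2.2)
    else if !vrai && positif then (st.1, st.2.1 + 1, st.2.2.1, st.2.2.2)
    else (st.1, st.2.1, st.2.2.1 + 1, st.2.2.2)
  | _, _ => st

def compare_intervalles (intervalle_1 : List Int) (intervalle_2 : List Int) : List (List Int) :=
  let st := (PySem.List.pyRange 0 (intervalle_1.length : Int) 1).foldl
    (pvBodyA intervalle_1 intervalle_2) (0, 0, 0, 0)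
  [[st.1, st.2.1], [st.2.2.1, st.2.2.2]]

-- ===== PORT B =====
-- Source B's sums of booleans over zips are ported as countP (the library tally)
def compare_intervalles_alt (intervalle_1 : List Int) (intervalle_2 : List Int) : List (List Int) :=
  let n : Int := intervalle_1.length
  let eq : Int := ((intervalle_1.zip intervalle_2).countP (fun p => p.1 == p.2) : Nat)
  let pos : Int := (intervalle_2.countP (fun b => b == 1) : Nat)
  let vp : Int := ((intervalle_1.zip intervalle_2).countP (fun p => p.1 == p.2 && p.2 == 1) : Nat)
  [[eq - vp, pos - vp], [n - eq - pos + vp, vp]]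

-- ===== PRECONDITION & SPEC =====
-- A asserts the two lists have equal length; Pre_ excludes exactly the AssertionError inputs.
def Pre_compare_intervalles (intervalle_1 : List Int) (intervalle_2 : List Int) : Prop :=
  intervalle_1.length = intervalle_2.length
instance (intervalle_1 : List Int) (intervalle_2 : List Int) : Decidable (Pre_compare_intervalles intervalle_1 intervalle_2) := by unfold Pre_compare_intervalles; infer_instance
def pvWitness_compare_intervalles : List Int × List Int := ([0, 1, 1], [1, 1, 0])

def Spec_compare_intervalles (intervalle_1 : List Int) (intervalle_2 : List Int) (out : List (List Int)) : Prop := out = compare_intervalles_alt intervalle_1 intervalle_2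
instance (intervalle_1 : List Int) (intervalle_2 : List Int) (out : List (List Int)) : Decidable (Spec_compare_intervalles intervalle_1 intervalle_2 out) := by unfold Spec_compare_intervalles; infer_instance

-- ===== CLAIM (what is proved, stated in full; the proofs are below) =====
def Claim_equal_compare_intervalles : Prop := ∀ (intervalle_1 : List Int) (intervalle_2 : List Int), Dom_compare_intervalles intervalle_1 intervalle_2 → Pre_compare_intervalles intervalle_1 intervalle_2 → Spec_compare_intervalles intervalle_1 intervalle_2 (compare_intervalles intervalle_1 intervalle_2)

-- ===== LEMMAS AND PROOFS =====

-- A's index loop, viewed over the zipped list: each step reads both lists at the same index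
lemma pvBodyA_zip (i1 i2 : List Int) (h : i1.length = i2.length)
    (st : Int × Int × Int × Int) :
    (PySem.List.pyRange 0 (i1.length : Int) 1).foldl (pvBodyA i1 i2) st
      = (i1.zip i2).foldl (fun st p =>
          if (p.1 == p.2) && (p.2 == 1) then (st.1, st.2.1, st.2.2.1, st.2.2.2 + 1)
          else if p.1 == p.2 then (st.1 + 1, st.2.1, st.2.2.1, st.2.2.2)
          else if !(p.1 == p.2) && (p.2 == 1) then (st.1, st.2.1 + 1, st.2.2.1, st.2.2.2)
          else (st.1, st.2.1, st.2.2.1 + 1, st.2.2.2)) st := by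
  have hlen : i1.length = (i1.zip i2).length := by
    simp [List.length_zip, h]
  rw [hlen]
  rw [show ((((i1.zip i2).length : Int)) = PySem.List.len (i1.zip i2)) from by
    simp [PySem.List.len]]
  rw [← PySem.List.foldl_pyRange_zero_pyGetD (i1.zip i2) (0, 0)
    (f := fun st p =>
      if (p.1 == p.2) && (p.2 == 1) then (st.1, st.2.1, st.2.2.1, st.2.2.2 + 1)
      else if p.1 == p.2 then (st.1 + 1, st.2.1, st.2.2.1, st.2.2.2)
      else if !(p.1 == p.2) && (p.2 == 1) then (st.1, st.2.1 + 1, st.2.2.1, st.2.2.2)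
      else (st.1, st.2.1, st.2.2.1 + 1, st.2.2.2)) (init := st)]
  apply PySem.List.foldl_congr_mem
  intro st' j hj
  rw [PySem.List.mem_pyRange_one] at hj
  have hj1 : 0 ≤ j := hj.1
  have hj2 : j.toNat < (i1.zip i2).length := by
    have := hj.2
    simp [PySem.List.len] at this
    omega
  have hget : ∀ (α : Type) (xs : List α) (k : Int), 0 ≤ k → k < (xs.length : Int) →
      PySem.List.pyGet? xs k = xs[k.toNat]? := by
    intro α xs k hk1 hk2
    simp only [PySem.List.pyGet?, PySem.List.pyIdx?]
    rw [if_pos hk1, if_pos hk2]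
    rfl
  have hza : PySem.List.pyGet? (i1.zip i2) j = some ((i1.zip i2)[j.toNat]) := by
    rw [hget _ _ _ hj1 (by omega)]
    exact List.getElem?_eq_getElem hj2
  have hj1' : j.toNat < i1.length := by simp [List.length_zip, h] at hj2 ⊢; omega
  have hj2' : j.toNat < i2.length := by omega
  have hga : PySem.List.pyGet? i1 j = some (i1[j.toNat]) := by
    rw [hget _ _ _ hj1 (by omega)]
    exact List.getElem?_eq_getElem hj1'
  have hgb : PySem.List.pyGet? i2 j = some (i2[j.toNat]) := by
    rw [hget _ _ _ hj1 (by omega)]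
    exact List.getElem?_eq_getElem hj2'
  simp [pvBodyA, hga, hgb, PySem.List.pyGetD, hza, List.getElem_zip]

-- A's zipped loop, characterised by the three aggregate tallies B computes:
-- each component is an inclusion-exclusion combination of eq, pos, vp over the processed pairs
lemma pvLoop_tallies (ps : List (Int × Int)) (st : Int × Int × Int × Int) :
    ps.foldl (fun st p =>
        if (p.1 == p.2) && (p.2 == 1) then (st.1, st.2.1, st.2.2.1, st.2.2.2 + 1)
        else if p.1 == p.2 then (st.1 + 1, st.2.1, st.2.2.1, st.2.2.2)
        else if !(p.1 == p.2) && (p.2 == 1) then (st.1, st.2.1 + 1, st.2.2.1, st.2.2.2)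
        else (st.1, st.2.1, st.2.2.1 + 1, st.2.2.2)) st
      = (st.1 + ((ps.countP (fun p => p.1 == p.2) : Int)
                 - (ps.countP (fun p => p.1 == p.2 && p.2 == 1) : Int)),
         st.2.1 + ((ps.countP (fun p => p.2 == 1) : Int)
                 - (ps.countP (fun p => p.1 == p.2 && p.2 == 1) : Int)),
         st.2.2.1 + ((ps.length : Int) - (ps.countP (fun p => p.1 == p.2) : Int)
                 - (ps.countP (fun p => p.2 == 1) : Int)
                 + (ps.countP (fun p => p.1 == p.2 && p.2 == 1) : Int)),
         st.2.2.2 + (ps.countP (fun p => p.1 == p.2 && p.2 == 1) : Int)) := by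
  induction ps generalizing st with
  | nil => simp
  | cons p t ih =>
    rcases p with ⟨a, b⟩
    rw [List.foldl_cons, ih]
    cases hab : (a == b) <;> cases hb1 : (b == 1) <;>
      simp [hab, hb1, Prod.ext_iff] <;> omega

-- with equal lengths, tallying predit==1 on intervalle_2 equals tallying it on the zip
lemma pvCountP_snd (i1 i2 : List Int) (h : i1.length = i2.length) :
    (i1.zip i2).countP (fun p => p.2 == 1) = i2.countP (fun b => b == 1) := by
  induction i1 generalizing i2 with
  | nil => cases i2 with
    | nil => rfl
    | cons b t => simp at h
  | cons a t ih =>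
    cases i2 with
    | nil => simp at h
    | cons b t2 =>
      simp only [List.zip_cons_cons, List.countP_cons]
      rw [ih t2 (by simpa using h)]

-- ===== VERDICT (by name: the statement is the Claim_ definition above) =====
theorem compare_intervalles_spec : Claim_equal_compare_intervalles := by
  intro i1 i2 _ hpre
  unfold Spec_compare_intervalles compare_intervalles compare_intervalles_alt
  rw [pvBodyA_zip i1 i2 hpre, pvLoop_tallies, pvCountP_snd i1 i2 hpre]
  have hn : ((i1.zip i2).length : Int) = (i1.length : Int) := by
    have : (i1.zip i2).length = i1.length := by
      have hl : i1.length = i2.length := hpre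
      simp [List.length_zip]; omega
    rw [this]
  simp only [hn]
  norm_num
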